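-- pv_equiv track=rewrite | github.com/davidadamojr/diary_of_programming_puzzles | arrays_and_strings/string_compression.py | calc_compressed_size
-- ===== SOURCE A (Python) =====
-- def calc_compressed_size(uncompressed_string):
--     """
--     calculates the size of the string after compression
--     """
--     uncompressed_length = len(uncompressed_string)
--     last_char = uncompressed_string[0]
--     count = 1
--     size = 0
--
--     for i in range(1, uncompressed_length):
--         same_character = uncompressed_string[i] == last_char
--         if same_character:
--             count = count + 1
--         else:
--             size = size + 1 + len(str(count))
--             last_char = uncompressed_string[i]
--             count = 1
--
--     size = size + 1 + len(str(count))
--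
--     return size
-- ===== SOURCE B (Python) =====
-- def calc_compressed_size(uncompressed_string):
--     """
--     calculates the size of the string after compression
--     (two-pointer run scanner: find each run's end, add its contribution)
--     """
--     n = len(uncompressed_string)
--     size = 0
--     i = 0
--     while i < n:
--         j = i + 1
--         while j < n and uncompressed_string[j] == uncompressed_string[i]:
--             j += 1
--         size += 1 + len(str(j - i))
--         i = j
--     return size
-- ===== Notes on version B (the rewrite author's own statement) =====
-- stated objective: alternative
-- what changed: Replaces A's single-pass last_char/count/size state machine with a two-pointer run scanner: an inner loop finds each run's end index, the outer loop jumps from run to run adding 1 + len(str(run length)).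
import Mathlib
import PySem

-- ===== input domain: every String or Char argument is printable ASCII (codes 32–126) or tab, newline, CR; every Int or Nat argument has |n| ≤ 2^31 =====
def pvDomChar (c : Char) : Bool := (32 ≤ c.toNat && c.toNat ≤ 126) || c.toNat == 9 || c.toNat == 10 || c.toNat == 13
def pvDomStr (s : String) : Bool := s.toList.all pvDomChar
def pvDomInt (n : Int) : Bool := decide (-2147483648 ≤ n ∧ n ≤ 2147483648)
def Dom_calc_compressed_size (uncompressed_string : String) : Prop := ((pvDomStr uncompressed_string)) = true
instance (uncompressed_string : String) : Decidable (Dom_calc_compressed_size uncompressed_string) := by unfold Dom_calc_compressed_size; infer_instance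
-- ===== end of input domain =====

-- B replaces A's single-pass last_char/count state machine by a two-pointer run scanner
-- (find each run's end index, add its contribution); objective: alternative.


-- ===== PORT A =====
-- A's loop body: state (last_char, count, size), one character of the string
def pvStepA (st : Char × Int × Int) (c : Char) : Char × Int × Int :=
  if c == st.1 then (st.1, st.2.1 + 1, st.2.2)
  else (c, 1, st.2.2 + 1 + PySem.Str.len (PySem.Int.toStr st.2.1))

def calc_compressed_size (uncompressed_string : String) : Int :=
  let cs := uncompressed_string.toList
  let uncompressed_length := PySem.List.len cs
  let last_char := PySem.List.pyGetD cs 0 ' '   -- indexing position 0: IndexError on the empty string (excluded by Pre_)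
  let st := (PySem.List.pyRange 1 uncompressed_length).foldl
      (fun st i => pvStepA st (PySem.List.pyGetD cs i ' ')) (last_char, 1, 0)
  st.2.2 + 1 + PySem.Str.len (PySem.Int.toStr st.2.1)

-- ===== PORT B =====
-- B's inner 'while j < n and s[j] == s[i]: j += 1' loop (head = s[i])
def pvRunEnd (cs : List Char) (head : Char) (j : Nat) : Nat :=
  if _h : j < cs.length ∧ PySem.List.pyGetD cs (j : Int) ' ' == head then
    pvRunEnd cs head (j + 1)
  else j
termination_by cs.length - j
decreasing_by omega

-- needed for the termination of pvGoB below (the run end is past its start)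
theorem pvRunEnd_ge (cs : List Char) (head : Char) (j : Nat) : j ≤ pvRunEnd cs head j := by
  induction j using pvRunEnd.induct (cs := cs) (head := head) with
  | case1 x h ih => rw [pvRunEnd, dif_pos h]; omega
  | case2 x h => rw [pvRunEnd, dif_neg h]

-- B's outer 'while i < n' loop, accumulating size run by run
def pvGoB (cs : List Char) (i : Nat) : Int :=
  if i < cs.length then
    let j := pvRunEnd cs (PySem.List.pyGetD cs (i : Int) ' ') (i + 1)
    (1 + PySem.Str.len (PySem.Int.toStr ((j : Int) - (i : Int)))) + pvGoB cs j
  else 0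
termination_by cs.length - i
decreasing_by
  have := pvRunEnd_ge cs (PySem.List.pyGetD cs (i : Int) ' ') (i + 1)
  omega

def calc_compressed_size_alt (uncompressed_string : String) : Int :=
  pvGoB uncompressed_string.toList 0

-- ===== PRECONDITION & SPEC =====
-- A raises IndexError on the empty string (it indexes position 0 before its loop); Pre_ excludes exactly that input.
def Pre_calc_compressed_size (uncompressed_string : String) : Prop := uncompressed_string ≠ ""
instance (uncompressed_string : String) : Decidable (Pre_calc_compressed_size uncompressed_string) := by unfold Pre_calc_compressed_size; infer_instance
def pvWitness_calc_compressed_size : String := "aabccc"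

def Spec_calc_compressed_size (uncompressed_string : String) (out : Int) : Prop := out = calc_compressed_size_alt uncompressed_string
instance (uncompressed_string : String) (out : Int) : Decidable (Spec_calc_compressed_size uncompressed_string out) := by unfold Spec_calc_compressed_size; infer_instance

-- ===== CLAIM (what is proved, stated in full; the proofs are below) =====
def Claim_equal_calc_compressed_size : Prop := ∀ (uncompressed_string : String), Dom_calc_compressed_size uncompressed_string → Pre_calc_compressed_size uncompressed_string → Spec_calc_compressed_size uncompressed_string (calc_compressed_size uncompressed_string)

-- ===== LEMMAS AND PROOFS =====

-- len(str(n)), as an Int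
def pvL (n : Int) : Int := PySem.Str.len (PySem.Int.toStr n)

-- A's loop, rewritten as structural recursion over the remaining characters
def pvGA (cs : List Char) (last : Char) (count size : Int) : Int :=
  match cs with
  | [] => size + 1 + pvL count
  | c :: rest =>
    if c == last then pvGA rest last (count + 1) size
    else pvGA rest c 1 (size + 1 + pvL count)

-- length of the leading run of `head` in `l`
def pvLead (head : Char) (l : List Char) : Nat := (l.takeWhile (· == head)).length

-- B's run scanning, rephrased as structural run-stripping on the suffix list
def pvGoBL (cs : List Char) : Int :=
  match cs with
  | [] => 0
  | c :: rest =>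
    1 + pvL ((1 + pvLead c rest : Nat) : Int) + pvGoBL (rest.drop (pvLead c rest))
termination_by cs.length
decreasing_by
  simp only [List.length_drop, List.length_cons]
  omega

theorem pvGA_foldl (cs : List Char) (last : Char) (count size : Int) :
    (let st := cs.foldl pvStepA (last, count, size); st.2.2 + 1 + pvL st.2.1) =
      pvGA cs last count size := by
  induction cs generalizing last count size with
  | nil => rfl
  | cons c rest ih =>
    simp only [List.foldl_cons, pvGA, pvStepA]
    by_cases h : (c == last) = true
    · rw [if_pos h, if_pos h, ← ih]
    · rw [if_neg h, if_neg h, ← ih]; rfl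

theorem pvGA_add (cs : List Char) (last : Char) (count size : Int) :
    pvGA cs last count size = size + pvGA cs last count 0 := by
  induction cs generalizing last count size with
  | nil => simp only [pvGA]; ring
  | cons c rest ih =>
    simp only [pvGA]
    by_cases h : (c == last) = true
    · rw [if_pos h, if_pos h, ih last (count + 1) size]
    · rw [if_neg h, if_neg h, ih c 1 (size + 1 + pvL count),
        ih c 1 (0 + 1 + pvL count)]
      ring

theorem pvRunEnd_eq (cs : List Char) (head : Char) (j : Nat) :
    pvRunEnd cs head j = j + pvLead head (cs.drop j) := by
  induction j using pvRunEnd.induct (cs := cs) (head := head) with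
  | case1 x h ih =>
    obtain ⟨hlt, heq⟩ := h
    rw [pvRunEnd, dif_pos ⟨hlt, heq⟩, ih, List.drop_eq_getElem_cons hlt]
    rw [PySem.List.pyGetD_eq_getElem _ _ (by positivity) (by exact_mod_cast hlt)] at heq
    simp only [Int.toNat_natCast] at heq
    simp only [pvLead, List.takeWhile_cons, heq, if_pos, List.length_cons]
    omega
  | case2 x h =>
    rw [pvRunEnd, dif_neg h]
    rcases Nat.lt_or_ge x cs.length with hlt | hge
    · have heq : ¬ (PySem.List.pyGetD cs (x : Int) ' ' == head) = true := by tauto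
      rw [PySem.List.pyGetD_eq_getElem _ _ (by positivity) (by exact_mod_cast hlt)] at heq
      simp only [Int.toNat_natCast] at heq
      rw [List.drop_eq_getElem_cons hlt]
      simp only [pvLead, List.takeWhile_cons, heq]
      simp
    · rw [List.drop_eq_nil_of_le hge]
      simp [pvLead]

-- B's index loop computes the structural run-stripping of the suffix
theorem pvGoB_eq_pvGoBL (cs : List Char) (i : Nat) :
    pvGoB cs i = pvGoBL (cs.drop i) := by
  by_cases hlt : i < cs.length
  · have hstep : pvGoB cs i =
        (1 + PySem.Str.len (PySem.Int.toStr
            ((pvRunEnd cs (PySem.List.pyGetD cs (i : Int) ' ') (i + 1) : Int) - (i : Int)))) +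
          pvGoB cs (pvRunEnd cs (PySem.List.pyGetD cs (i : Int) ' ') (i + 1)) := by
      rw [pvGoB, if_pos hlt]
    have hget : PySem.List.pyGetD cs (i : Int) ' ' = cs[i] := by
      rw [PySem.List.pyGetD_eq_getElem _ _ (by positivity) (by exact_mod_cast hlt)]
      simp
    have hjval : pvRunEnd cs (PySem.List.pyGetD cs (i : Int) ' ') (i + 1) =
        i + 1 + pvLead cs[i] (cs.drop (i + 1)) := by
      rw [hget, pvRunEnd_eq]
    have ih := pvGoB_eq_pvGoBL cs (pvRunEnd cs (PySem.List.pyGetD cs (i : Int) ' ') (i + 1))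
    rw [hstep, ih, hjval]
    rw [List.drop_eq_getElem_cons hlt, pvGoBL]
    have hdrops : (cs.drop (i + 1)).drop (pvLead cs[i] (cs.drop (i + 1))) =
        cs.drop (i + 1 + pvLead cs[i] (cs.drop (i + 1))) := by
      rw [List.drop_drop]
    rw [hdrops]
    have hcast : ((i + 1 + pvLead cs[i] (cs.drop (i + 1)) : Nat) : Int) - (i : Int) =
        ((1 + pvLead cs[i] (cs.drop (i + 1)) : Nat) : Int) := by push_cast; try ring
    rw [hcast]
    simp only [pvL]
  · rw [pvGoB, if_neg hlt, List.drop_eq_nil_of_le (by omega), pvGoBL]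
termination_by cs.length - i
decreasing_by
  have := pvRunEnd_ge cs (PySem.List.pyGetD cs (i : Int) ' ') (i + 1)
  omega

-- the central invariant: A's state machine, started inside a run of `c` already `k+1` long,
-- computes the run-stripping recursion's value
theorem pvGA_goBL (rest : List Char) : ∀ (c : Char) (k : Nat),
    pvGA rest c ((k : Int) + 1) 0 =
      1 + pvL ((k : Int) + 1 + (pvLead c rest : Int)) + pvGoBL (rest.drop (pvLead c rest)) := by
  induction rest with
  | nil => intro c k; simp only [pvGA, pvLead, List.takeWhile_nil, List.length_nil,
      List.drop_nil, pvGoBL, Nat.cast_zero, add_zero]; ring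
  | cons x rest' ih =>
    intro c k
    simp only [pvGA]
    by_cases h : (x == c) = true
    · have hc : x = c := by simpa using h
      subst hc
      rw [if_pos (by simp)]
      have hlead : pvLead x (x :: rest') = pvLead x rest' + 1 := by
        simp [pvLead]
      have hk : ((k : Int) + 1) + 1 = ((k + 1 : Nat) : Int) + 1 := by push_cast; ring
      rw [hk, ih x (k + 1), hlead, List.drop_succ_cons]
      congr 2
      push_cast; ring
    · rw [if_neg h]
      have hlead : pvLead c (x :: rest') = 0 := by
        simp only [pvLead, List.takeWhile_cons]
        simp [h]
      rw [pvGA_add, hlead, List.drop_zero]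
      rw [show pvGoBL (x :: rest') = 1 + pvL ((1 + pvLead x rest' : Nat) : Int) +
            pvGoBL (rest'.drop (pvLead x rest')) from by rw [pvGoBL]]
      have h0 : pvGA rest' x 1 0 = pvGA rest' x (((0:Nat) : Int) + 1) 0 := by norm_num
      rw [h0, ih x 0]
      have hcast : ((0:Nat) : Int) + 1 + (pvLead x rest' : Int) = ((1 + pvLead x rest' : Nat) : Int) := by
        push_cast; ring
      rw [hcast]
      ring

theorem pv_toList_ne_nil (s : String) (h : s ≠ "") : s.toList ≠ [] := by
  intro hnil
  exact h (by rwa [← String.toList_eq_nil_iff])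

-- ===== VERDICT (by name: the statement is the Claim_ definition above) =====
theorem calc_compressed_size_spec : Claim_equal_calc_compressed_size := by
  intro s _hdom hpre
  unfold Spec_calc_compressed_size calc_compressed_size calc_compressed_size_alt
  obtain ⟨c, rest, hcs⟩ := List.exists_cons_of_ne_nil (pv_toList_ne_nil s hpre)
  simp only [hcs]
  rw [PySem.List.foldl_pyRange_pyGetD (c :: rest) ' ' pvStepA _ (by norm_num : (0:Int) ≤ 1)]
  simp only [Int.toNat_one, List.drop_one, List.tail_cons]
  rw [show PySem.List.pyGetD (c :: rest) 0 ' ' = c from by simp [pysem]]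
  have hA := pvGA_foldl rest c 1 0
  simp only [pvL] at hA
  rw [hA]
  have hmain := pvGA_goBL rest c 0
  simp only [Nat.cast_zero, zero_add] at hmain
  rw [hmain, pvGoB_eq_pvGoBL (c :: rest) 0, List.drop_zero,
    show pvGoBL (c :: rest) = 1 + pvL ((1 + pvLead c rest : Nat) : Int) +
      pvGoBL (rest.drop (pvLead c rest)) from by rw [pvGoBL]]
  have hcast : ((1 + pvLead c rest : Nat) : Int) = 1 + (pvLead c rest : Int) := by push_cast; ring
  rw [hcast]
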